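-- pv_equiv track=rewrite | github.com/daniel-reich/ubiquitous-fiesta | s89T6kpDGf8Pc6mzf_23.py | seven_segment
-- ===== SOURCE A (Python) =====
-- def seven_segment(txt):
--   D={'0':('abcdef','g'),
--   '1':('bc','adefg'),
--   '2':('abdeg','cf'),
--   '3':('abcdg','ef'),
--   '4':('bcfg','ade'),
--   '5':('acdfg','be'),
--   '6':('acdefg','b'),
--   '7':('abc', 'defg'),
--   '8':('abcdefg',''),
--   '9':('abcfg','de')}
--   res=[[] for _ in range(len(txt)-1)]
--   for i in range(len(txt)-1):
--     for x in D[txt[i]][0]: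
--       if x in D[txt[i+1]][-1]:
--         res[i].append(x)
--     for y in D[txt[i]][-1]:
--       if y in D[txt[i+1]][0]:
--         res[i].append(y.upper())
--   B=[sorted(x, key=lambda t: t.lower()) for x in res]
--   return B
-- ===== SOURCE B (Python) =====
-- def seven_segment(txt):
--   ON = {'0': 'abcdef', '1': 'bc', '2': 'abdeg', '3': 'abcdg', '4': 'bcfg',
--         '5': 'acdfg', '6': 'acdefg', '7': 'abc', '8': 'abcdefg', '9': 'abcfg'}
--   res = []
--   for cur, nxt in zip(txt, txt[1:]):
--     a, b = ON[cur], ON[nxt]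
--     res.append([c if c in a else c.upper()
--                 for c in 'abcdefg' if (c in a) != (c in b)])
--   return res
-- ===== Notes on version B (the rewrite author's own statement) =====
-- stated objective: simpler
-- what changed: Instead of two membership loops over the on/off string pair per adjacent pair followed by a case-insensitive sort, B keeps only the lit-segment string per digit and makes one ordered pass over the segment alphabet a–g per zip pair, emitting each changed segment (lowercase if turned off, uppercase if turned on) already in sorted order, so the sort disappears.
import Mathlib
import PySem

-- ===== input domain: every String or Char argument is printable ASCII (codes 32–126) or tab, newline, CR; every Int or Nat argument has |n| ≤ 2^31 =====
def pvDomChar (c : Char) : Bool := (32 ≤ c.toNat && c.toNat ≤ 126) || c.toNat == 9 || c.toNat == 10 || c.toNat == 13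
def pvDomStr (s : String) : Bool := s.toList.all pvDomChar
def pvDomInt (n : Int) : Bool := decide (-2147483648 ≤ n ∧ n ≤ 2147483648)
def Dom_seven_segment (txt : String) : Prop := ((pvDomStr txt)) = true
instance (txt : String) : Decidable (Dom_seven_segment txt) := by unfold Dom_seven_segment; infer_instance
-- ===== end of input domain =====

-- B replaces A's per-pair double membership loop + case-insensitive sort by one ordered pass
-- over the segment alphabet per adjacent pair (simpler; return value only, no mutation involved).

-- ===== PORT A =====
-- D[c]; a non-digit c raises KeyError in Python (excluded by Pre_); the default pair here is never reached under Pre_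
def pvSegA (c : Char) : List Char × List Char :=
  if c = '0' then ("abcdef".toList, "g".toList)
  else if c = '1' then ("bc".toList, "adefg".toList)
  else if c = '2' then ("abdeg".toList, "cf".toList)
  else if c = '3' then ("abcdg".toList, "ef".toList)
  else if c = '4' then ("bcfg".toList, "ade".toList)
  else if c = '5' then ("acdfg".toList, "be".toList)
  else if c = '6' then ("acdefg".toList, "b".toList)
  else if c = '7' then ("abc".toList, "defg".toList)
  else if c = '8' then ("abcdefg".toList, "".toList)
  else if c = '9' then ("abcfg".toList, "de".toList)
  else ([], [])

-- res[i] for one i: A's two membership loops ('x in str' on a 1-char x is char membership)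
def pvPairA (cur nxt : Char) : List String :=
  ((pvSegA cur).1.filter (fun x => (pvSegA nxt).2.contains x)).map (fun x => String.ofList [x])
    ++ ((pvSegA cur).2.filter (fun y => (pvSegA nxt).1.contains y)).map
        (fun y => String.ofList [PySem.Chars.upperChar y])

-- sorted(x, key=lambda t: t.lower()); Python's str '<' is code-point lexicographic = '<' on .toList
def seven_segment (txt : String) : List (List String) :=
  let l := txt.toList
  let res := (PySem.List.pyRange 0 ((l.length : Int) - 1) 1).map (fun i =>
    pvPairA (PySem.List.pyGetD l i ' ') (PySem.List.pyGetD l (i + 1) ' '))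
  res.map (fun x => PySem.List.sorted x (fun t => (PySem.Str.lower t).toList) false)

-- ===== PORT B =====
-- ON[c]; a non-digit c raises KeyError in Python B (excluded by Pre_); the default is never reached under Pre_
def pvOnB (c : Char) : List Char :=
  if c = '0' then "abcdef".toList
  else if c = '1' then "bc".toList
  else if c = '2' then "abdeg".toList
  else if c = '3' then "abcdg".toList
  else if c = '4' then "bcfg".toList
  else if c = '5' then "acdfg".toList
  else if c = '6' then "acdefg".toList
  else if c = '7' then "abc".toList
  else if c = '8' then "abcdefg".toList
  else if c = '9' then "abcfg".toList
  else []

-- B's comprehension for one zip pair: one ordered pass over the segment letters a–g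
def pvPairB (cur nxt : Char) : List String :=
  let a := pvOnB cur
  let b := pvOnB nxt
  ("abcdefg".toList.filter (fun c => a.contains c != b.contains c)).map
    (fun c => if a.contains c then String.ofList [c] else String.ofList [PySem.Chars.upperChar c])

def seven_segment_alt (txt : String) : List (List String) :=
  let l := txt.toList
  (l.zip l.tail).map (fun p => pvPairB p.1 p.2)

-- ===== PRECONDITION & SPEC =====
-- Pre_ excludes exactly the inputs where both Pythons raise KeyError: length ≥ 2 with some non-digit character
def Pre_seven_segment (txt : String) : Prop :=
  txt.toList.length ≤ 1 ∨ txt.toList.all (fun c => c.isDigit) = true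
instance (txt : String) : Decidable (Pre_seven_segment txt) := by unfold Pre_seven_segment; infer_instance
def pvWitness_seven_segment : String := "8023"

def Spec_seven_segment (txt : String) (out : List (List String)) : Prop := out = seven_segment_alt txt
instance (txt : String) (out : List (List String)) : Decidable (Spec_seven_segment txt out) := by unfold Spec_seven_segment; infer_instance

-- ===== CLAIM (what is proved, stated in full; the proofs are below) =====
def Claim_equal_seven_segment : Prop := ∀ (txt : String), Dom_seven_segment txt → Pre_seven_segment txt → Spec_seven_segment txt (seven_segment txt)

-- ===== LEMMAS AND PROOFS =====

theorem pv_digit_mem (c : Char) (h : c.isDigit = true) : c ∈ ("0123456789".toList) := by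
  simp [Char.isDigit] at h
  obtain ⟨h1, h2⟩ := h
  have a1 : 48 ≤ c.toNat := by exact_mod_cast h1
  have a2 : c.toNat ≤ 57 := by exact_mod_cast h2
  have hn : c.toNat = 48 ∨ c.toNat = 49 ∨ c.toNat = 50 ∨ c.toNat = 51 ∨ c.toNat = 52 ∨
      c.toNat = 53 ∨ c.toNat = 54 ∨ c.toNat = 55 ∨ c.toNat = 56 ∨ c.toNat = 57 := by omega
  have hc : ∀ d : Char, c.toNat = d.toNat → c = d := fun d h => Char.ext (UInt32.toNat_inj.mp h)
  rcases hn with h|h|h|h|h|h|h|h|h|h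
  · simp [hc '0' (by rw [h]; rfl)]
  · simp [hc '1' (by rw [h]; rfl)]
  · simp [hc '2' (by rw [h]; rfl)]
  · simp [hc '3' (by rw [h]; rfl)]
  · simp [hc '4' (by rw [h]; rfl)]
  · simp [hc '5' (by rw [h]; rfl)]
  · simp [hc '6' (by rw [h]; rfl)]
  · simp [hc '7' (by rw [h]; rfl)]
  · simp [hc '8' (by rw [h]; rfl)]
  · simp [hc '9' (by rw [h]; rfl)]

theorem pv_pair_eq_bool : (("0123456789".toList).all (fun c => ("0123456789".toList).all (fun d =>
    PySem.List.sorted (pvPairA c d) (fun t => (PySem.Str.lower t).toList) false == pvPairB c d))) = true := by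
  decide

theorem pv_pair_eq (c d : Char) (hc : c.isDigit = true) (hd : d.isDigit = true) :
    PySem.List.sorted (pvPairA c d) (fun t => (PySem.Str.lower t).toList) false = pvPairB c d := by
  have h := pv_pair_eq_bool
  rw [List.all_eq_true] at h
  have h1 := h c (pv_digit_mem c hc)
  rw [List.all_eq_true] at h1
  have h2 := h1 d (pv_digit_mem d hd)
  exact eq_of_beq h2

theorem pv_zip_map {α β : Type} (f : α → α → β) (d : α) :
    ∀ (l : List α), (List.range (l.length - 1)).map (fun k => f (l.getD k d) (l.getD (k + 1) d))
      = (l.zip l.tail).map (fun p => f p.1 p.2)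
  | [] => by simp
  | [a] => by simp
  | a :: b :: t => by
    have ih := pv_zip_map f d (b :: t)
    simp only [List.length_cons, Nat.add_sub_cancel, List.range_succ_eq_map, List.map_cons,
      List.map_map, List.tail_cons, List.zip_cons_cons] at *
    refine congrArg (List.cons _) ?_
    simpa using ih

theorem seven_segment_spec : Claim_equal_seven_segment := by
  intro txt _ hpre
  unfold Spec_seven_segment seven_segment seven_segment_alt
  simp only [List.map_map]
  have hb : (((txt.toList.length : Int) - 1) - 0).toNat = txt.toList.length - 1 := by omega
  rw [PySem.List.pyRange_one, hb, List.map_map]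
  have key := pv_zip_map
    (fun c d => PySem.List.sorted (pvPairA c d) (fun t => (PySem.Str.lower t).toList) false)
    ' ' txt.toList
  refine Eq.trans ?_ (Eq.trans key ?_)
  · apply List.map_congr_left
    intro k _
    simp only [Function.comp_apply]
    have h2 : ((k : Int) + 1) = (((k + 1 : Nat)) : Int) := by push_cast; ring
    simp only [zero_add, h2, PySem.List.pyGetD_natCast]
  · apply List.map_congr_left
    intro p hp
    rcases hpre with hlen | hdig
    · exfalso
      rcases h : txt.toList with _ | ⟨x, _ | ⟨y, t⟩⟩ <;> rw [h] at hp hlen <;> simp_all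
    · rw [List.all_eq_true] at hdig
      have h1 : p.1 ∈ txt.toList := (List.of_mem_zip hp).1
      have h2 : p.2 ∈ txt.toList := List.mem_of_mem_tail (List.of_mem_zip hp).2
      exact pv_pair_eq p.1 p.2 (hdig _ h1) (hdig _ h2)
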